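-- pv_equiv track=rewrite | github.com/nooodle-soup/kata-machine-python | src/katas/MessageDeliverySystem.py | getMessageStatus
-- ===== SOURCE A (Python) =====
-- def getMessageStatus(timestamps, messages, k):
--     """
--     Parameters
--     ----------
--     timestams: list of int
--         List of the timestamps at which the messages arrive
--     messages: list of str
--         List of the messages which arrived at their corresponding timestamps
--     k: int
--         Time duration for which the messages are in memory
--
--     Returns
--     -------
--     list of bool
--         List of success states (whether message is delivered or not)
--     """
--     result = []
--     tracker = {}
--
--     for timestamp, message in zip(timestamps, messages):
--         prev_arrival_time = tracker.get(message, None)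
--
--         if not prev_arrival_time:
--             result.append(True)
--
--         elif timestamp - prev_arrival_time > k:
--             result.append(True)
--
--         else:
--             result.append(False)
--
--         tracker[message] = timestamp
--
--     return result
-- ===== SOURCE B (Python) =====
-- def getMessageStatus(timestamps, messages, k):
--     pairs = list(zip(timestamps, messages))
--     groups = {}  # message -> ordered list of (position, timestamp)
--     for i, (t, m) in enumerate(pairs):
--         groups.setdefault(m, []).append((i, t))
--     result = [False] * len(pairs)
--     for occ in groups.values():
--         prev = None
--         for i, t in occ:
--             result[i] = True if not prev else t - prev > k
--             prev = t
--     return result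
-- ===== Notes on version B (the rewrite author's own statement) =====
-- stated objective: alternative
-- what changed: Replaces A's single pass with a live last-seen tracker dict by a two-phase grouped computation: first index each message's ordered (position, timestamp) occurrences, then walk each group writing statuses into a preallocated result list.
import Mathlib
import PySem

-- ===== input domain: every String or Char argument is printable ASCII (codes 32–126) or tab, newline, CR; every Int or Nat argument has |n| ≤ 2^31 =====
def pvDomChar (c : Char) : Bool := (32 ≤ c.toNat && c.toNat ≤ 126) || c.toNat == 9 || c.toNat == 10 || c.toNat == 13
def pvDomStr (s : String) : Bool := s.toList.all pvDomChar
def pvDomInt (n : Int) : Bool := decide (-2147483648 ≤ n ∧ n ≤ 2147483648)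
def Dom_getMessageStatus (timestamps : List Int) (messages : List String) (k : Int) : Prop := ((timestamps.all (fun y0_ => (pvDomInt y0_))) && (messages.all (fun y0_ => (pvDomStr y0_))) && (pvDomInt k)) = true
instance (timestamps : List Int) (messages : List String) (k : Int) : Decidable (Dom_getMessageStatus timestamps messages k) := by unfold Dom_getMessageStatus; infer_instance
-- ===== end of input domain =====

-- B replaces A's single pass with a live last-seen dict by a two-phase grouped computation (index of per-message occurrences, then per-group walks writing into a preallocated result); same return value.


-- ===== PORT A =====
-- one loop iteration of A: look the message up in the tracker dict, append the status, overwrite the tracker entry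
def pvStepA (k : Int) (st : List Bool × PySem.Dict String Int) (p : Int × String) : List Bool × PySem.Dict String Int :=
  let prev := st.2.get? p.2
  let ok : Bool :=
    match prev with
    | none => true                                   -- 'not prev_arrival_time' with prev = None
    | some pv => if pv = 0 then true                 -- 'not prev_arrival_time' with prev = 0 (falsy)
                 else decide (p.1 - pv > k)
  (st.1 ++ [ok], st.2.insert p.2 p.1)

def getMessageStatus (timestamps : List Int) (messages : List String) (k : Int) : List Bool :=
  ((timestamps.zip messages).foldl (pvStepA k) ([], PySem.Dict.empty)).1

-- ===== PORT B =====
-- 'True if not prev else t - prev > k'  (prev = None or 0 is falsy)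
def pvOk (k : Int) (prev : Option Int) (t : Int) : Bool :=
  match prev with
  | none => true
  | some pv => if pv = 0 then true else decide (t - pv > k)

-- the inner 'for i, t in occ: result[i] = …; prev = t' walk of one group
-- (positions i come from enumerate, hence 0 ≤ i < len(result): .toNat is exact here)
def pvWriteGroup (k : Int) : List (Int × Int) → Option Int → List Bool → List Bool
  | [], _, r => r
  | q :: rest, prev, r => pvWriteGroup k rest (some q.2) (r.set q.1.toNat (pvOk k prev q.2))

def getMessageStatus_alt (timestamps : List Int) (messages : List String) (k : Int) : List Bool :=
  let pairs := timestamps.zip messages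
  -- 'groups.setdefault(m, []).append((i, t))' is exactly Dict.modify m [] (· ++ [(i, t)])
  let groups : PySem.Dict String (List (Int × Int)) :=
    (PySem.List.enumerate pairs).foldl
      (fun d ip => d.modify ip.2.2 [] (· ++ [(ip.1, ip.2.1)])) PySem.Dict.empty
  groups.values.foldl (fun r occ => pvWriteGroup k occ none r) (List.replicate pairs.length false)

-- ===== PRECONDITION & SPEC =====
def Spec_getMessageStatus (timestamps : List Int) (messages : List String) (k : Int) (out : List Bool) : Prop := out = getMessageStatus_alt timestamps messages k
instance (timestamps : List Int) (messages : List String) (k : Int) (out : List Bool) : Decidable (Spec_getMessageStatus timestamps messages k out) := by unfold Spec_getMessageStatus; infer_instance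

-- ===== CLAIM (what is proved, stated in full; the proofs are below) =====
def Claim_equal_getMessageStatus : Prop := ∀ (timestamps : List Int) (messages : List String) (k : Int), Dom_getMessageStatus timestamps messages k → Spec_getMessageStatus timestamps messages k (getMessageStatus timestamps messages k)

-- ===== LEMMAS AND PROOFS =====

-- proof-side reference computation: a seen-list scan giving, at each position, the previous arrival time
def pvScanPrev : List (Int × String) → String → Option Int
  | [], _ => none
  | q :: rest, m => if q.2 = m then some q.1 else pvScanPrev rest m

def pvStepSeen (k : Int) (st : List Bool × List (Int × String)) (p : Int × String) : List Bool × List (Int × String) :=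
  (st.1 ++ [pvOk k (pvScanPrev st.2.reverse p.2) p.1], st.2 ++ [p])

def pvSpec (k : Int) (l : List (Int × String)) : List Bool :=
  (l.foldl (pvStepSeen k) ([], [])).1

def pvGroups (l : List (Int × String)) : PySem.Dict String (List (Int × Int)) :=
  (PySem.List.enumerate l).foldl (fun d ip => d.modify ip.2.2 [] (· ++ [(ip.1, ip.2.1)])) PySem.Dict.empty

def pvOcc (l : List (Int × String)) (m : String) : List (Int × Int) := (pvGroups l).getD m []

def pvPipe (k : Int) (l : List (Int × String)) : List Bool :=
  (pvGroups l).values.foldl (fun r occ => pvWriteGroup k occ none r) (List.replicate l.length false)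

def pvFoldK (k : Int) (f : String → List (Int × Int)) (K : List String) (r : List Bool) : List Bool :=
  K.foldl (fun r m => pvWriteGroup k (f m) none r) r

-- prev after walking a whole occurrence list
def pvLastP : List (Int × Int) → Option Int → Option Int
  | [], prev => prev
  | q :: rest, _ => pvLastP rest (some q.2)

lemma pvScanPrev_append (seen : List (Int × String)) (t : Int) (m m' : String) :
    pvScanPrev ((seen ++ [(t, m)]).reverse) m' =
      if m = m' then some t else pvScanPrev seen.reverse m' := by
  simp [pvScanPrev]

-- ===== A equals the seen-scan reference =====
lemma pvLoopA_eq (k : Int) (l : List (Int × String)) :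
    ∀ (res : List Bool) (tr : PySem.Dict String Int) (seen : List (Int × String)),
      (∀ m, tr.get? m = pvScanPrev seen.reverse m) →
      (l.foldl (pvStepA k) (res, tr)).1 = (l.foldl (pvStepSeen k) (res, seen)).1 := by
  induction l with
  | nil => intro res tr seen _; rfl
  | cons p rest ih =>
    intro res tr seen hinv
    simp only [List.foldl_cons]
    have hstep : pvStepA k (res, tr) p =
        ((pvStepSeen k (res, seen) p).1, tr.insert p.2 p.1) := by
      simp [pvStepA, pvStepSeen, pvOk, hinv p.2]
    rw [hstep]
    exact ih _ _ _ (by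
      intro m
      rw [PySem.Dict.get?_insert, pvScanPrev_append, hinv m]
      by_cases h : m = p.2 <;> simp [h, eq_comm])

lemma pvA_eq_spec (timestamps : List Int) (messages : List String) (k : Int) :
    getMessageStatus timestamps messages k = pvSpec k (timestamps.zip messages) := by
  unfold getMessageStatus pvSpec
  exact pvLoopA_eq k _ [] PySem.Dict.empty []
    (fun m => by simp [PySem.Dict.get?_empty, pvScanPrev])

-- ===== facts about the seen-scan reference =====
lemma pvSeen_snd (k : Int) (l : List (Int × String)) :
    ∀ (res : List Bool) (seen : List (Int × String)),
      (l.foldl (pvStepSeen k) (res, seen)).2 = seen ++ l := by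
  induction l with
  | nil => intro res seen; simp
  | cons p rest ih =>
    intro res seen
    simp only [List.foldl_cons]
    rw [ih]
    simp [pvStepSeen]

lemma pvSpec_append (k : Int) (l : List (Int × String)) (p : Int × String) :
    pvSpec k (l ++ [p]) = pvSpec k l ++ [pvOk k (pvScanPrev l.reverse p.2) p.1] := by
  unfold pvSpec
  rw [List.foldl_append]
  have h2 := pvSeen_snd k l [] []
  simp only [List.foldl_cons, List.foldl_nil]
  rw [show (pvStepSeen k (l.foldl (pvStepSeen k) ([], []))
        p).1 = (l.foldl (pvStepSeen k) ([], [])).1 ++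
          [pvOk k (pvScanPrev (l.foldl (pvStepSeen k) ([], [])).2.reverse p.2) p.1] from rfl, h2]
  simp

-- ===== facts about the groups index =====
lemma pvGroups_append (l : List (Int × String)) (p : Int × String) :
    pvGroups (l ++ [p]) =
      (pvGroups l).modify p.2 [] (· ++ [((l.length : Int), p.1)]) := by
  unfold pvGroups
  rw [PySem.List.enumerate_append, List.foldl_append]
  simp [PySem.List.enumerate]

lemma pvOcc_append (l : List (Int × String)) (p : Int × String) (m : String) :
    pvOcc (l ++ [p]) m =
      if m = p.2 then pvOcc l m ++ [((l.length : Int), p.1)] else pvOcc l m := by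
  unfold pvOcc
  rw [pvGroups_append, PySem.Dict.getD_modify]
  by_cases h : m = p.2 <;> simp [h]

lemma pvOcc_nil (m : String) : pvOcc [] m = [] := rfl

lemma pvOcc_bound (l : List (Int × String)) (m : String) :
    ∀ q ∈ pvOcc l m, 0 ≤ q.1 ∧ q.1 < (l.length : Int) := by
  induction l using List.reverseRecOn with
  | nil => intro q hq; simp [pvOcc_nil] at hq
  | append_singleton l p ih =>
    intro q hq
    rw [pvOcc_append] at hq
    by_cases h : m = p.2
    · rw [if_pos h] at hq
      rcases List.mem_append.1 hq with hq | hq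
      · have := ih q hq; simp; omega
      · simp at hq; subst hq; simp
    · rw [if_neg h] at hq
      have := ih q hq; simp; omega

lemma pvLastP_append (occ : List (Int × Int)) (q : Int × Int) :
    ∀ prev, pvLastP (occ ++ [q]) prev = some q.2 := by
  induction occ with
  | nil => intro prev; rfl
  | cons a rest ih => intro prev; simp only [List.cons_append, pvLastP]; exact ih _

lemma pvLastP_eq_scan (l : List (Int × String)) (m : String) :
    pvLastP (pvOcc l m) none = pvScanPrev l.reverse m := by
  induction l using List.reverseRecOn with
  | nil => rfl
  | append_singleton l p ih =>
    rw [pvOcc_append, pvScanPrev_append]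
    by_cases h : m = p.2
    · rw [if_pos h, if_pos h.symm, pvLastP_append]
    · rw [if_neg h, if_neg (fun hh => h hh.symm), ih]

-- ===== facts about the group-writing loop =====
lemma pvWriteGroup_length (k : Int) (occ : List (Int × Int)) :
    ∀ prev r, (pvWriteGroup k occ prev r).length = r.length := by
  induction occ with
  | nil => intro prev r; rfl
  | cons q rest ih => intro prev r; rw [pvWriteGroup, ih]; simp

lemma pvWriteGroup_set_comm (k : Int) (occ : List (Int × Int)) (j : Nat) (b : Bool) :
    ∀ prev r, (∀ q ∈ occ, q.1.toNat ≠ j) →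
      pvWriteGroup k occ prev (r.set j b) = (pvWriteGroup k occ prev r).set j b := by
  induction occ with
  | nil => intro prev r _; rfl
  | cons q rest ih =>
    intro prev r h
    simp only [pvWriteGroup]
    rw [List.set_comm _ _ (Ne.symm (h q (by simp))), ih _ _ (fun q' hq' => h q' (by simp [hq']))]

lemma pvWriteGroup_append_keep (k : Int) (occ : List (Int × Int)) (s : List Bool) :
    ∀ prev r, (∀ q ∈ occ, q.1.toNat < r.length) →
      pvWriteGroup k occ prev (r ++ s) = pvWriteGroup k occ prev r ++ s := by
  induction occ with
  | nil => intro prev r _; rfl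
  | cons q rest ih =>
    intro prev r h
    simp only [pvWriteGroup]
    have hq : q.1.toNat < r.length := h q (by simp)
    rw [List.set_append_left _ _ hq, ih _ _ (fun q' hq' => by
      rw [List.length_set]; exact h q' (by simp [hq']))]

lemma pvWriteGroup_snoc (k : Int) (occ : List (Int × Int)) (q : Int × Int) :
    ∀ prev r, pvWriteGroup k (occ ++ [q]) prev r =
      (pvWriteGroup k occ prev r).set q.1.toNat (pvOk k (pvLastP occ prev) q.2) := by
  induction occ with
  | nil => intro prev r; rfl
  | cons a rest ih =>
    intro prev r
    simp only [List.cons_append, pvWriteGroup, pvLastP]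
    exact ih _ _

-- ===== facts about the fold over the groups' keys =====
lemma pvFoldK_congr (k : Int) (f g : String → List (Int × Int)) (K : List String)
    (h : ∀ m ∈ K, f m = g m) : ∀ r, pvFoldK k f K r = pvFoldK k g K r := by
  induction K with
  | nil => intro r; rfl
  | cons m rest ih =>
    intro r
    simp only [pvFoldK, List.foldl_cons] at *
    rw [h m (by simp)]
    exact ih (fun m' hm' => h m' (by simp [hm'])) _

lemma pvFoldK_append_keep (k : Int) (f : String → List (Int × Int)) (K : List String) (s : List Bool) :
    ∀ r, (∀ m ∈ K, ∀ q ∈ f m, q.1.toNat < r.length) →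
      pvFoldK k f K (r ++ s) = pvFoldK k f K r ++ s := by
  induction K with
  | nil => intro r _; rfl
  | cons m rest ih =>
    intro r h
    simp only [pvFoldK, List.foldl_cons] at *
    rw [pvWriteGroup_append_keep _ _ _ _ _ (h m (by simp)), ih _ (fun m' hm' q hq => by
      rw [pvWriteGroup_length]; exact h m' (by simp [hm']) q hq)]

lemma pvFoldK_set_comm (k : Int) (f : String → List (Int × Int)) (K : List String)
    (j : Nat) (b : Bool) :
    ∀ r, (∀ m ∈ K, ∀ q ∈ f m, q.1.toNat ≠ j) →
      pvFoldK k f K (r.set j b) = (pvFoldK k f K r).set j b := by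
  induction K with
  | nil => intro r _; rfl
  | cons m rest ih =>
    intro r h
    simp only [pvFoldK, List.foldl_cons] at *
    rw [pvWriteGroup_set_comm _ _ _ _ _ _ (h m (by simp)),
      ih _ (fun m' hm' q hq => h m' (by simp [hm']) q hq)]

lemma pvGroups_keys_nodup (l : List (Int × String)) : (pvGroups l).keys.Nodup := by
  unfold pvGroups
  exact PySem.Dict.nodup_keys_foldl_modify_key (PySem.List.enumerate l)
    (fun (ip : Int × (Int × String)) => ip.2.2) []
    (fun (_ : PySem.Dict String (List (Int × Int))) (ip : Int × (Int × String)) (v : List (Int × Int)) => v ++ [(ip.1, ip.2.1)])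
    PySem.Dict.empty (by simp [PySem.Dict.keys_empty])

lemma pvKeys_append (l : List (Int × String)) (p : Int × String) :
    (pvGroups (l ++ [p])).keys =
      if (pvGroups l).contains p.2 then (pvGroups l).keys else (pvGroups l).keys ++ [p.2] := by
  rw [pvGroups_append, PySem.Dict.keys_modify]
  by_cases h : (pvGroups l).contains p.2
  · rw [if_pos h, PySem.Dict.keys_insert_of_contains _ _ h]
  · rw [if_neg h, PySem.Dict.keys_insert_of_not_contains _ _ (by simpa using h)]

lemma pvPipe_eq_foldK (k : Int) (l : List (Int × String)) :
    pvPipe k l = pvFoldK k (pvOcc l) (pvGroups l).keys (List.replicate l.length false) := by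
  unfold pvPipe pvFoldK
  rw [PySem.Dict.values_eq_map_keys _ (pvGroups_keys_nodup l) [], List.foldl_map]
  rfl

lemma pvSpec_length (k : Int) (l : List (Int × String)) : (pvSpec k l).length = l.length := by
  induction l using List.reverseRecOn with
  | nil => rfl
  | append_singleton l p ih => rw [pvSpec_append]; simp [ih]

-- ===== the master equality: grouped two-phase B equals the seen-scan reference =====
lemma pvPipe_eq_spec (k : Int) (l : List (Int × String)) : pvPipe k l = pvSpec k l := by
  induction l using List.reverseRecOn with
  | nil => rfl
  | append_singleton l p ih =>
    have hb : ∀ m ∈ (pvGroups l).keys, ∀ q ∈ pvOcc l m, q.1.toNat < (List.replicate l.length (false : Bool)).length := by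
      intro m _ q hq
      have := pvOcc_bound l m q hq
      simp only [List.length_replicate]
      omega
    have hocc_ne : ∀ m, m ≠ p.2 → pvOcc (l ++ [p]) m = pvOcc l m := by
      intro m hm; rw [pvOcc_append, if_neg hm]
    have hXlen : (pvSpec k l).length = l.length := pvSpec_length k l
    have hIH : pvFoldK k (pvOcc l) (pvGroups l).keys (List.replicate l.length false) = pvSpec k l := by
      rw [← pvPipe_eq_foldK]; exact ih
    have hr0 : List.replicate (l ++ [p]).length (false : Bool) =
        List.replicate l.length false ++ [false] := by
      simp [List.replicate_succ']
    have hok : pvOk k (pvLastP (pvOcc l p.2) none) p.1 = pvOk k (pvScanPrev l.reverse p.2) p.1 := by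
      rw [pvLastP_eq_scan]
    rw [pvPipe_eq_foldK, pvSpec_append, pvKeys_append, hr0]
    by_cases h : (pvGroups l).contains p.2
    · -- p.2 already has a group: its occurrence list grows by one at the end
      rw [if_pos h]
      have hmem : p.2 ∈ (pvGroups l).keys := (PySem.Dict.contains_iff_mem_keys _ _).1 h
      obtain ⟨K1, K2, hK⟩ := List.append_of_mem hmem
      have hnd := pvGroups_keys_nodup l
      rw [hK] at hnd
      have hK1 : p.2 ∉ K1 := by
        intro hin
        exact (List.disjoint_of_nodup_append hnd) hin (by simp)
      have hK2 : p.2 ∉ K2 := by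
        have := (List.nodup_append.1 hnd).2.1
        simp [List.nodup_cons] at this
        exact this.1
      rw [hK]
      simp only [pvFoldK, List.foldl_append, List.foldl_cons]
      rw [show ∀ r, List.foldl (fun r m => pvWriteGroup k (pvOcc (l ++ [p]) m) none r) r K1 =
            pvFoldK k (pvOcc (l ++ [p])) K1 r from fun _ => rfl]
      rw [pvFoldK_congr k _ (pvOcc l) K1 (fun m hm => hocc_ne m (fun he => hK1 (he ▸ hm)))]
      rw [pvOcc_append, if_pos rfl, pvWriteGroup_snoc]
      have htoNat : ((l.length : Int)).toNat = l.length := by simp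
      rw [htoNat, hok]
      rw [show ∀ r, List.foldl (fun r m => pvWriteGroup k (pvOcc (l ++ [p]) m) none r) r K2 =
            pvFoldK k (pvOcc (l ++ [p])) K2 r from fun _ => rfl]
      rw [pvFoldK_congr k _ (pvOcc l) K2 (fun m hm => hocc_ne m (fun he => hK2 (he ▸ hm)))]
      rw [pvFoldK_set_comm k (pvOcc l) K2 l.length _ _ (by
        intro m hm q hq
        have := pvOcc_bound l m q hq
        omega)]
      -- reassemble the fold over K1 ++ p.2 :: K2 on the un-extended occurrence lists
      have hassemble : pvFoldK k (pvOcc l) K2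
            (pvWriteGroup k (pvOcc l p.2) none (pvFoldK k (pvOcc l) K1 (List.replicate l.length false ++ [false]))) =
          pvFoldK k (pvOcc l) (K1 ++ p.2 :: K2) (List.replicate l.length false ++ [false]) := by
        simp [pvFoldK, List.foldl_append]
      rw [hassemble]
      have hkeep : pvFoldK k (pvOcc l) (K1 ++ p.2 :: K2) (List.replicate l.length false ++ [false]) =
          pvFoldK k (pvOcc l) (K1 ++ p.2 :: K2) (List.replicate l.length false) ++ [false] :=
        pvFoldK_append_keep k _ _ _ _ (by rw [← hK]; exact hb)
      rw [hkeep, ← hK, hIH]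
      rw [show (pvSpec k l ++ [false]).set l.length (pvOk k (pvScanPrev l.reverse p.2) p.1) =
            pvSpec k l ++ [pvOk k (pvScanPrev l.reverse p.2) p.1] by
        rw [← hXlen]; simp]
    · -- first occurrence of p.2: a new singleton group is appended
      rw [if_neg h]
      simp only [pvFoldK, List.foldl_append, List.foldl_cons, List.foldl_nil]
      rw [show ∀ r, List.foldl (fun r m => pvWriteGroup k (pvOcc (l ++ [p]) m) none r) r (pvGroups l).keys =
            pvFoldK k (pvOcc (l ++ [p])) (pvGroups l).keys r from fun _ => rfl]
      have hnotmem : p.2 ∉ (pvGroups l).keys := fun hm =>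
        h ((PySem.Dict.contains_iff_mem_keys _ _).2 hm)
      rw [pvFoldK_congr k _ (pvOcc l) _ (fun m hm => hocc_ne m (fun he => hnotmem (he ▸ hm)))]
      rw [pvFoldK_append_keep k _ _ _ _ hb, hIH]
      rw [pvOcc_append, if_pos rfl,
        show pvOcc l p.2 = [] from PySem.Dict.getD_of_not_contains _ _ (by simpa using h)]
      have hscan : pvScanPrev l.reverse p.2 = none := by
        rw [← pvLastP_eq_scan, show pvOcc l p.2 = [] from PySem.Dict.getD_of_not_contains _ _ (by simpa using h)]
        rfl
      rw [hscan]
      simp only [List.nil_append, pvWriteGroup, pvOk]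
      have htoNat : ((l.length : Int)).toNat = l.length := by simp
      rw [htoNat]
      rw [show (pvSpec k l ++ [false]).set l.length true = pvSpec k l ++ [true] by
        rw [← hXlen]; simp]

lemma pvAlt_eq_pipe (timestamps : List Int) (messages : List String) (k : Int) :
    getMessageStatus_alt timestamps messages k = pvPipe k (timestamps.zip messages) := rfl

-- ===== VERDICT (by name: the statement is the Claim_ definition above) =====
theorem getMessageStatus_spec : Claim_equal_getMessageStatus := by
  intro timestamps messages k _
  unfold Spec_getMessageStatus
  rw [pvA_eq_spec, pvAlt_eq_pipe, pvPipe_eq_spec]
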